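-- pv_equiv track=rewrite | github.com/monsegard/portfolio | IM/кудряшов/Кр2/шифры/vigener.py | cfb_encrypt
-- ===== SOURCE A (Python) =====
-- def encrypt(m, k, l):
--     c = (m + k) % l
--     return c
--
-- def cfb_encrypt(data, key, iv, l=256):
--     u = len(key)
--     cypher_data = []
--     i = 0
--     for m in data:
--         c = encrypt(iv, key[i % u], l)
--         i += 1
--         m = m ^ iv
--         iv = c
--         cypher_data.append(m)
--     return cypher_data
-- ===== SOURCE B (Python) =====
-- def cfb_encrypt(data, key, iv, l=256):
--     # Closed-form keystream: for j >= 1, keystream[j] = (iv + q*sum(key) + prefix[r]) % l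
--     # where q, r = divmod(j, len(key)) and prefix[r] = sum(key[:r]); keystream[0] is the
--     # raw iv.  Each output byte is computed independently from its index (random access,
--     # parallelizable) -- no state is carried across the data, only a key-sized table.
--     if not data:
--         return []
--     u = len(key)
--     prefix = [0]
--     for kk in key:
--         prefix.append(prefix[-1] + kk)
--     K = prefix[u]
--     out = [data[0] ^ iv]
--     for j in range(1, len(data)):
--         q, r = divmod(j, u)
--         out.append(data[j] ^ ((iv + q * K + prefix[r]) % l))
--     return out
-- ===== Notes on version B (the rewrite author's own statement) =====
-- stated objective: alternative
-- what changed: Replaces A's loop-carried iv recurrence by a closed-form keystream: a key-length prefix-sum table is built once, and each output byte j>=1 is computed independently as data[j] ^ ((iv + (j//u)*sum(key) + prefix[j%u]) % l) via divmod on the index, so no state flows across the data.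
import Mathlib
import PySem

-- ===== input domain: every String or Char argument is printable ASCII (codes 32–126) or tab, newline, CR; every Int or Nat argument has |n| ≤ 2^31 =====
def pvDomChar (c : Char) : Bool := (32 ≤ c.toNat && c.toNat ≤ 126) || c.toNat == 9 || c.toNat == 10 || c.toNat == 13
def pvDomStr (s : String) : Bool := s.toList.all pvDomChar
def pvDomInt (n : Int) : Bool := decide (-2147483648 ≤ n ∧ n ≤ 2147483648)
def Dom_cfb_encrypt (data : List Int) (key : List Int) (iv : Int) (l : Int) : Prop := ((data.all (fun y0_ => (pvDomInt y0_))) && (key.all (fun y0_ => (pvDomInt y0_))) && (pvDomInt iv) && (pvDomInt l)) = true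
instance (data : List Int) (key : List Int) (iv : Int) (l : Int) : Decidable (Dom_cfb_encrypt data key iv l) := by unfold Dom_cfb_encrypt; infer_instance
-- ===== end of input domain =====

-- B replaces A's loop-carried iv recurrence by a closed-form keystream: each output byte
-- is computed independently from its index via divmod and a key-length prefix-sum table.

-- ===== PORT A =====
-- helper 'encrypt' from the Python module
def pyEncrypt (m k l : Int) : Int := PySem.Int.mod (m + k) l

-- A's for-loop as the obvious structural recursion over data with the same state (iv, i);
-- key[i % u] is total here via getD (Pre_ excludes the inputs where Python raises).
def cfbLoopA (key : List Int) (l : Int) (u : Nat) : List Int → Int → Nat → List Int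
  | [], _, _ => []
  | m :: rest, iv, i =>
      let c := pyEncrypt iv (key.getD (i % u) 0) l
      (PySem.Int.bxor m iv) :: cfbLoopA key l u rest c (i + 1)

def cfb_encrypt (data : List Int) (key : List Int) (iv : Int) (l : Int) : List Int :=
  cfbLoopA key l key.length data iv 0

-- ===== PORT B =====
-- prefix[-1] of Source B is the last element: getLast!; indexing is total via getD
-- (in-range under Pre_, exactly as Python's prefix[r] / data[j] are).
def cfb_encrypt_alt (data : List Int) (key : List Int) (iv : Int) (l : Int) : List Int :=
  if data.length = 0 then []
  else
    let u := key.length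
    let pre := key.foldl (fun acc kk => acc ++ [acc.getLast! + kk]) ([0] : List Int)
    let K := pre.getD u 0
    PySem.Int.bxor (data.getD 0 0) iv ::
      (List.range' 1 (data.length - 1)).map (fun j =>
        let q := j / u
        let r := j % u
        PySem.Int.bxor (data.getD j 0) (PySem.Int.mod (iv + (q : Int) * K + pre.getD r 0) l))

-- ===== PRECONDITION & SPEC =====
-- Pre_ excludes exactly the inputs where Python A raises ZeroDivisionError:
-- nonempty data with an empty key (i % 0) or with l = 0 ((m+k) % 0).
def Pre_cfb_encrypt (data : List Int) (key : List Int) (iv : Int) (l : Int) : Prop :=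
  data = [] ∨ (key ≠ [] ∧ l ≠ 0)
instance (data : List Int) (key : List Int) (iv : Int) (l : Int) : Decidable (Pre_cfb_encrypt data key iv l) := by unfold Pre_cfb_encrypt; infer_instance

def pvWitness_cfb_encrypt : List Int × List Int × Int × Int := ([1, 2, 3], [5, 7], 300, 256)

def Spec_cfb_encrypt (data : List Int) (key : List Int) (iv : Int) (l : Int) (out : List Int) : Prop := out = cfb_encrypt_alt data key iv l
instance (data : List Int) (key : List Int) (iv : Int) (l : Int) (out : List Int) : Decidable (Spec_cfb_encrypt data key iv l out) := by unfold Spec_cfb_encrypt; infer_instance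

-- ===== CLAIM (what is proved, stated in full; the proofs are below) =====
def Claim_equal_cfb_encrypt : Prop := ∀ (data : List Int) (key : List Int) (iv : Int) (l : Int), Dom_cfb_encrypt data key iv l → Pre_cfb_encrypt data key iv l → Spec_cfb_encrypt data key iv l (cfb_encrypt data key iv l)

-- ===== LEMMAS AND PROOFS =====

-- cumulative key sum: sum of key[(i+t) % u] for t < m  (proof-side only)
def ksum (key : List Int) (u : Nat) (i : Nat) : Nat → Int
  | 0 => 0
  | m + 1 => ksum key u i m + key.getD ((i + m) % u) 0

-- the iv sequence A threads through its loop  (proof-side only)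
def ivAt (key : List Int) (l : Int) (u : Nat) : Int → Nat → Nat → Int
  | iv, _, 0 => iv
  | iv, i, j + 1 => ivAt key l u (PySem.Int.mod (iv + key.getD (i % u) 0) l) (i + 1) j

-- the running sums Source B's prefix loop appends after the seed  (proof-side only)
def tailSums (s : Int) : List Int → List Int
  | [] => []
  | k :: ks => (s + k) :: tailSums (s + k) ks

-- Python '%' is periodic in its left argument: reducing first changes nothing (l ≠ 0).
lemma pv_mod_add_left (a b l : Int) (hl : l ≠ 0) :
    PySem.Int.mod (PySem.Int.mod a l + b) l = PySem.Int.mod (a + b) l := by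
  rcases lt_or_gt_of_ne hl with hneg | hpos
  · have h : ∀ x : Int, PySem.Int.mod x l = -PySem.Int.mod (-x) (-l) := by
      intro x
      have h2 := PySem.Int.mod_neg_neg (-x) (-l)
      simpa using h2
    have hpos' : (0:Int) < -l := by omega
    rw [h a, h (-PySem.Int.mod (-a) (-l) + b), h (a + b)]
    have he : -(-PySem.Int.mod (-a) (-l) + b) = PySem.Int.mod (-a) (-l) + (-b) := by ring
    rw [he, PySem.Int.mod_eq_emod_of_pos hpos', PySem.Int.mod_eq_emod_of_pos hpos',
        PySem.Int.mod_eq_emod_of_pos hpos', Int.emod_add_emod]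
    congr 1
    ring_nf
  · simp [PySem.Int.mod_eq_emod_of_pos hpos, Int.emod_add_emod]

lemma ksum_shift (key : List Int) (u i : Nat) : ∀ m,
    ksum key u i (m + 1) = key.getD (i % u) 0 + ksum key u (i + 1) m := by
  intro m
  induction m generalizing i with
  | zero => simp [ksum]
  | succ m ih =>
      show ksum key u i (m + 1) + key.getD ((i + (m + 1)) % u) 0
          = key.getD (i % u) 0 + (ksum key u (i + 1) m + key.getD (((i + 1) + m) % u) 0)
      rw [ih i]
      have h : i + (m + 1) = (i + 1) + m := by omega
      rw [h]
      ring

lemma ivAt_telescope (key : List Int) (l : Int) (u : Nat) (hl : l ≠ 0) : ∀ j iv i,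
    ivAt key l u iv i (j + 1) = PySem.Int.mod (iv + ksum key u i (j + 1)) l := by
  intro j
  induction j with
  | zero => intro iv i; simp [ivAt, ksum]
  | succ j ih =>
      intro iv i
      show ivAt key l u (PySem.Int.mod (iv + key.getD (i % u) 0) l) (i + 1) (j + 1) = _
      rw [ih, pv_mod_add_left _ _ _ hl, ksum_shift key u i (j + 1)]
      congr 1
      ring

lemma cfbLoopA_length (key : List Int) (l : Int) (u : Nat) :
    ∀ data iv i, (cfbLoopA key l u data iv i).length = data.length := by
  intro data
  induction data with
  | nil => intro iv i; simp [cfbLoopA]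
  | cons m rest ih => intro iv i; simp [cfbLoopA, ih]

lemma cfbLoopA_getElem (key : List Int) (l : Int) (u : Nat) :
    ∀ (data : List Int) (iv : Int) (i j : Nat) (hj : j < data.length),
    (cfbLoopA key l u data iv i)[j]'(by rw [cfbLoopA_length]; exact hj)
      = PySem.Int.bxor data[j] (ivAt key l u iv i j) := by
  intro data
  induction data with
  | nil => intro iv i j hj; simp at hj
  | cons m rest ih =>
      intro iv i j hj
      cases j with
      | zero => simp [cfbLoopA, ivAt]
      | succ j =>
          simp only [cfbLoopA, List.getElem_cons_succ]
          rw [ih]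
          rfl

-- Source B's prefix-building foldl is append of the running tail sums
lemma prefix_foldl (key : List Int) : ∀ (acc : List Int) (s : Int),
    key.foldl (fun acc kk => acc ++ [acc.getLast! + kk]) (acc ++ [s])
      = (acc ++ [s]) ++ tailSums s key := by
  induction key with
  | nil => intro acc s; simp [tailSums]
  | cons k ks ih =>
      intro acc s
      have hl : (acc ++ [s]).getLast! = s := List.getLast!_of_getLast? (by simp)
      simp only [List.foldl_cons, hl]
      have : acc ++ [s] ++ [s + k] = (acc ++ [s]) ++ [s + k] := by simp
      rw [this, ih (acc ++ [s]) (s + k)]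
      simp [tailSums]

lemma tailSums_getD (key : List Int) : ∀ (s : Int) (r : Nat), r < key.length →
    (tailSums s key).getD r 0 = s + (key.take (r + 1)).sum := by
  induction key with
  | nil => intro s r h; simp at h
  | cons k ks ih =>
      intro s r h
      cases r with
      | zero => simp [tailSums]
      | succ r =>
          have hr : r < ks.length := by simpa using h
          simp only [tailSums, List.getD_cons_succ]
          rw [ih (s + k) r hr]
          simp [List.take_succ_cons]
          ring

-- the prefix table entry r (r ≤ len key) is the sum of the first r key elements
lemma pre_getD (key : List Int) (r : Nat) (hr : r ≤ key.length) :
    (key.foldl (fun acc kk => acc ++ [acc.getLast! + kk]) ([0] : List Int)).getD r 0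
      = (key.take r).sum := by
  have h0 : ([0] : List Int) = [] ++ [0] := by simp
  rw [h0, prefix_foldl key [] 0]
  cases r with
  | zero => simp
  | succ r =>
      have hr' : r < key.length := by omega
      simp only [List.nil_append, List.cons_append, List.nil_append]
      show ((0 : Int) :: tailSums 0 key).getD (r + 1) 0 = _
      rw [List.getD_cons_succ, tailSums_getD key 0 r hr']
      simp

-- closed form of the cumulative key sum via divmod on the index
lemma ksum_closed (key : List Int) (hu : 0 < key.length) : ∀ j,
    ksum key key.length 0 j
      = ((j / key.length : Nat) : Int) * key.sum + (key.take (j % key.length)).sum := by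
  intro j
  set u := key.length with hu'
  induction j with
  | zero => simp [ksum]
  | succ j ih =>
      have hjm : j % u < u := Nat.mod_lt _ hu
      have hstep : ksum key u 0 (j + 1) = ksum key u 0 j + key.getD (j % u) 0 := by
        simp [ksum]
      have hget : key.getD (j % u) 0 = key[j % u]'(by omega) :=
        List.getD_eq_getElem key 0 (by omega)
      have hsum : (key.take (j % u)).sum + key[j % u]'(by omega)
          = (key.take (j % u + 1)).sum := (List.sum_take_succ key (j % u) (by omega)).symm
      by_cases hcase : j % u + 1 = u
      · -- end of a key period: quotient steps, remainder resets
        have hj1 : j + 1 = u * (j / u + 1) := by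
          have := Nat.div_add_mod j u; rw [Nat.mul_succ]; omega
        have hdiv : (j + 1) / u = j / u + 1 := by
          rw [hj1, Nat.mul_div_cancel_left _ hu]
        have hmod : (j + 1) % u = 0 := by
          rw [hj1, Nat.mul_mod_right]
        rw [hstep, ih, hget, add_assoc, hsum, hcase, hdiv, hmod]
        have : (key.take u).sum = key.sum := by rw [hu']; simp
        rw [this]
        simp only [List.take_zero, List.sum_nil, add_zero]
        push_cast
        ring
      · -- inside a key period: quotient fixed, remainder increments
        have hlt : j % u + 1 < u := by omega
        have hj1 : j + 1 = j % u + 1 + u * (j / u) := by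
          have := Nat.div_add_mod j u; omega
        have hdiv : (j + 1) / u = j / u := by
          rw [hj1, Nat.add_mul_div_left _ _ hu, Nat.div_eq_of_lt hlt]; omega
        have hmod : (j + 1) % u = j % u + 1 := by
          rw [hj1, Nat.add_mul_mod_self_left, Nat.mod_eq_of_lt hlt]
        rw [hstep, ih, hget, add_assoc, hsum, hdiv, hmod]

-- ===== VERDICT (by name: the statement is the Claim_ definition above) =====
theorem cfb_encrypt_spec : Claim_equal_cfb_encrypt := by
  intro data key iv l _ hpre
  unfold Spec_cfb_encrypt
  rcases hpre with h0 | ⟨hk, hl⟩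
  · subst h0; rfl
  · unfold cfb_encrypt cfb_encrypt_alt
    have hu : 0 < key.length := List.length_pos_of_ne_nil hk
    cases data with
    | nil => simp [cfbLoopA]
    | cons d rest =>
        simp only [List.length_cons]
        rw [if_neg (by omega)]
        have hks : rest.length + 1 - 1 = rest.length := by omega
        rw [hks]
        have hlen1 : (cfbLoopA key l key.length (d :: rest) iv 0).length = rest.length + 1 := by
          rw [cfbLoopA_length]; simp
        apply List.ext_getElem
        · simp [hlen1]
        · intro j h1 h2
          rw [cfbLoopA_getElem key l key.length (d :: rest) iv 0 j
            (by rw [hlen1] at h1; simpa using h1)]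
          cases j with
          | zero => simp [ivAt]
          | succ t =>
              have ht : t < rest.length := by simp at h2; omega
              simp only [List.getElem_cons_succ, List.getElem_map]
              rw [List.getElem_range'_1]
              have hdj : (d :: rest).getD (1 + t) 0 = (d :: rest)[t + 1]'(by simp; omega) := by
                rw [Nat.add_comm 1 t]
                exact List.getD_eq_getElem _ 0 (by simp; omega)
              rw [hdj]
              rw [ivAt_telescope key l key.length hl t iv 0]
              have h1t : 1 + t = t + 1 := by omega
              rw [h1t, ksum_closed key hu (t + 1)]
              simp only [pre_getD key ((t + 1) % key.length) (le_of_lt (Nat.mod_lt _ hu)),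
                pre_getD key key.length le_rfl]
              simp [add_assoc]
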